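-- pv_equiv track=rewrite | github.com/Robinson-Clemente/Python-Algoritmos | Algoritmo_Ordenamiento.py | encontrarUltimoExtremoMayorRepetido
-- ===== SOURCE A (Python) =====
-- def encontrarUltimoExtremoMayorRepetido(contador, extremo_mayor, sublista0):
--     numero = 0
--     indice = (len(sublista0) - 1) - contador
--
--     if contador == 0:
--         numero = sublista0[len(sublista0) - 1]
--     else:
--         numero = sublista0[indice]
--
--     if numero == extremo_mayor:
--         return indice
--     else:
--         contador += 1
--         return encontrarUltimoExtremoMayorRepetido(contador, extremo_mayor, sublista0)
-- ===== SOURCE B (Python) =====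
-- def encontrarUltimoExtremoMayorRepetido(contador, extremo_mayor, sublista0):
--     idx = len(sublista0) - 1 - contador
--     while sublista0[idx] != extremo_mayor:
--         idx -= 1
--     return idx
-- ===== Notes on version B (the rewrite author's own statement) =====
-- stated objective: simpler
-- what changed: Replaces A's self-recursion (with its separate contador==0 branch and contador bookkeeping) by a three-line iterative while loop over a single descending index; Pre_ excludes only inputs on which both programs raise IndexError (no occurrence reachable before the index runs off the list).
import Mathlib
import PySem

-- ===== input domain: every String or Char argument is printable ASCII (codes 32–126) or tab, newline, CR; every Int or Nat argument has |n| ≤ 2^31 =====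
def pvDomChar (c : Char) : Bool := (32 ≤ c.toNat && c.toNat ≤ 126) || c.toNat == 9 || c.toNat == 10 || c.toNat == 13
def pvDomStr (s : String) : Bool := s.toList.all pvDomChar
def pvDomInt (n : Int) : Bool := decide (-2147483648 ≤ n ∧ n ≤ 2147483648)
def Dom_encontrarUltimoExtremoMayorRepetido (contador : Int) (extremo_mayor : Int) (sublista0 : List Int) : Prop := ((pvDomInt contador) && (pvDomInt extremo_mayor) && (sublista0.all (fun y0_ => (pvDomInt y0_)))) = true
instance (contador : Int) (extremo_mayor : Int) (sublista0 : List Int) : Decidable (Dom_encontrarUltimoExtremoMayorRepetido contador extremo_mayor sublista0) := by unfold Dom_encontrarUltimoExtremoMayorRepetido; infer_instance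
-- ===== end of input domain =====

-- B replaces A's recursion (and its contador==0 special case) by one iterative descending-index while loop; objective: simpler.

-- ===== PORT A =====
-- termination helper (cited by decreasing_by of both ports): a successful pyGet? bounds the index
lemma pvGetSomeBounds {l : List Int} {i x : Int} (h : PySem.List.pyGet? l i = some x) :
    -(l.length : Int) ≤ i ∧ i < l.length := by
  have hn : ¬ (PySem.List.pyGet? l i = none) := by simp [h]
  rw [PySem.List.pyGet?_eq_none_iff] at hn
  unfold PySem.Raise.InRange at hn
  omega

-- literal port of A's recursion; where Python raises IndexError (pyGet? = none,
-- outside Pre_) the port returns 0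
def encontrarUltimoExtremoMayorRepetido (contador : Int) (extremo_mayor : Int) (sublista0 : List Int) : Int :=
  let indice : Int := ((sublista0.length : Int) - 1) - contador
  let numero? : Option Int :=
    if contador = 0 then PySem.List.pyGet? sublista0 ((sublista0.length : Int) - 1)
    else PySem.List.pyGet? sublista0 indice
  match h : numero? with
  | none => 0
  | some numero =>
    if numero = extremo_mayor then indice
    else encontrarUltimoExtremoMayorRepetido (contador + 1) extremo_mayor sublista0
termination_by (2 * (sublista0.length : Int) - contador).toNat
decreasing_by
  simp only [numero?, indice] at h
  split at h
  · rcases pvGetSomeBounds h with ⟨h1, -⟩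
    omega
  · rcases pvGetSomeBounds h with ⟨h1, -⟩
    omega

-- ===== PORT B =====
-- Source B's while loop: read sublista0[idx], stop on a hit, else idx -= 1;
-- where Python raises IndexError (pyGet? = none, outside Pre_) the port returns 0
def pvWhile (sublista0 : List Int) (extremo_mayor : Int) (idx : Int) : Int :=
  match h : PySem.List.pyGet? sublista0 idx with
  | none => 0
  | some v => if v = extremo_mayor then idx else pvWhile sublista0 extremo_mayor (idx - 1)
termination_by (idx + (sublista0.length : Int) + 1).toNat
decreasing_by
  rcases pvGetSomeBounds h with ⟨h1, -⟩
  omega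

def encontrarUltimoExtremoMayorRepetido_alt (contador : Int) (extremo_mayor : Int) (sublista0 : List Int) : Int :=
  pvWhile sublista0 extremo_mayor (((sublista0.length : Int) - 1) - contador)

-- ===== PRECONDITION & SPEC =====
-- Pre_ is exactly where the Python A returns (and B does too): contador ≥ 0, a
-- nonempty list, and extremo_mayor occurring among the positions the descending
-- (wrapping) scan reaches before the index falls below -len; both programs raise
-- IndexError on everything excluded.
def Pre_encontrarUltimoExtremoMayorRepetido (contador : Int) (extremo_mayor : Int) (sublista0 : List Int) : Prop :=
  0 ≤ contador ∧ sublista0 ≠ [] ∧ extremo_mayor ∈ sublista0.take (2 * (sublista0.length : Int) - contador).toNat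
instance (contador : Int) (extremo_mayor : Int) (sublista0 : List Int) : Decidable (Pre_encontrarUltimoExtremoMayorRepetido contador extremo_mayor sublista0) := by unfold Pre_encontrarUltimoExtremoMayorRepetido; infer_instance

def pvWitness_encontrarUltimoExtremoMayorRepetido : Int × Int × List Int := (0, 5, [3, 5, 2])

def Spec_encontrarUltimoExtremoMayorRepetido (contador : Int) (extremo_mayor : Int) (sublista0 : List Int) (out : Int) : Prop := out = encontrarUltimoExtremoMayorRepetido_alt contador extremo_mayor sublista0
instance (contador : Int) (extremo_mayor : Int) (sublista0 : List Int) (out : Int) : Decidable (Spec_encontrarUltimoExtremoMayorRepetido contador extremo_mayor sublista0 out) := by unfold Spec_encontrarUltimoExtremoMayorRepetido; infer_instance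

-- ===== CLAIM (what is proved, stated in full; the proofs are below) =====
def Claim_equal_encontrarUltimoExtremoMayorRepetido : Prop := ∀ (contador : Int) (extremo_mayor : Int) (sublista0 : List Int), Dom_encontrarUltimoExtremoMayorRepetido contador extremo_mayor sublista0 → Pre_encontrarUltimoExtremoMayorRepetido contador extremo_mayor sublista0 → Spec_encontrarUltimoExtremoMayorRepetido contador extremo_mayor sublista0 (encontrarUltimoExtremoMayorRepetido contador extremo_mayor sublista0)

-- ===== LEMMAS AND PROOFS =====

-- step-by-step agreement: A at contador c reads the same cell as B's loop at
-- idx = len - 1 - c (A's c = 0 branch reads len - 1 = len - 1 - 0), then both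
-- stop or step in lockstep; proved for ALL inputs by strong induction on A's
-- termination measure.
theorem encontrarUltimoExtremoMayorRepetido_main (e : Int) (l : List Int) :
    ∀ (k : Nat) (c : Int), (2 * (l.length : Int) - c).toNat = k →
    encontrarUltimoExtremoMayorRepetido c e l = pvWhile l e (((l.length : Int) - 1) - c) := by
  intro k
  induction k using Nat.strong_induction_on with
  | _ k ih =>
  intro c hk
  have hnum : (if c = 0 then PySem.List.pyGet? l ((l.length : Int) - 1)
      else PySem.List.pyGet? l ((l.length : Int) - 1 - c))
      = PySem.List.pyGet? l ((l.length : Int) - 1 - c) := by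
    by_cases hc : c = 0
    · subst hc; norm_num
    · rw [if_neg hc]
  rw [encontrarUltimoExtremoMayorRepetido]
  split
  · next hmatch =>
    simp only [hnum] at hmatch
    rw [pvWhile, hmatch]
  · next v hmatch =>
    simp only [hnum] at hmatch
    rw [pvWhile, hmatch]
    by_cases hv : v = e
    · simp [hv]
    · simp only [hv, if_false]
      rcases pvGetSomeBounds hmatch with ⟨h1, -⟩
      have := ih (2 * (l.length : Int) - (c + 1)).toNat (by omega) (c + 1) rfl
      rw [this]
      congr 1
      ring

-- ===== VERDICT (by name: the statement is the Claim_ definition above) =====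
theorem encontrarUltimoExtremoMayorRepetido_spec : Claim_equal_encontrarUltimoExtremoMayorRepetido := by
  intro contador extremo_mayor sublista0 _ _
  exact encontrarUltimoExtremoMayorRepetido_main extremo_mayor sublista0 _ contador rfl
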